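-- pv_equiv track=rewrite | github.com/madisonchamberlain/rushHour | rushhour.py | num_cars_above
-- ===== SOURCE A (Python) =====
-- def num_cars_above(letter, state):
--   coords = coords_car(letter, state)
--   rows = []
--   for coord_pair in coords:
--     rows.append(coord_pair[0])
--     # if car is at the top anyway return 0
--     if coord_pair[0] == 0:
--       return 0
--   # if car not at top, and the spot above is not empty, its being blocked
--   if state[min(rows) - 1][coords[0][1]] != "-":
--     return 1
--   # if not being blocked return 0
--   else:
--     return 0
--
-- def coords_car(letter, state):
--   list_of_coords = []
--   for row in range(len(state)):
--     for col in range(len(state[0])):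
--       if state[row][col] == letter:
--         coords = [row, col]
--         list_of_coords.append(coords)
--   return list_of_coords
-- ===== SOURCE B (Python) =====
-- def num_cars_above(letter, state):
--     for r, row in enumerate(state):
--         for c, cell in enumerate(row):
--             if cell == letter:
--                 if r == 0:
--                     return 0
--                 return 1 if state[r - 1][c] != "-" else 0
--     raise ValueError("car not found")
-- ===== Notes on version B (the rewrite author's own statement) =====
-- stated objective: simpler
-- what changed: B is a single early-exit row-major scan that decides at the FIRST cell equal to letter, instead of A's staged pipeline that builds the full coordinate list of all occurrences and then post-processes it with a loop, min() and indexing.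
-- outside the precondition, e.g. on num_cars_above('X', [['-'], ['-', 'X'], ['X']]): A returns 0, B raises IndexError
import Mathlib
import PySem

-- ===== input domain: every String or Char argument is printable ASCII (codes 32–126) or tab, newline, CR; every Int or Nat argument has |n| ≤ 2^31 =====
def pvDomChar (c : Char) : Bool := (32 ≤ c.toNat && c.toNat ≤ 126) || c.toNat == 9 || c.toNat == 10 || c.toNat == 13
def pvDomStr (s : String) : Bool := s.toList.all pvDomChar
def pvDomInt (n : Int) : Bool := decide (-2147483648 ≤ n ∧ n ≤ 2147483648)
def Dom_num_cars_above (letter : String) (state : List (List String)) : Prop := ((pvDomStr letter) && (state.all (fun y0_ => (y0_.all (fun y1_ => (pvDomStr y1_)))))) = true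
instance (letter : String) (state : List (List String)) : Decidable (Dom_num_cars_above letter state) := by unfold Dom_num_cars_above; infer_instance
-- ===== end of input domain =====

-- B replaces A's coords-list + min + index pipeline by a single early-exit row-major scan; objective: simpler.


-- ===== PORT A =====
def coords_car (letter : String) (state : List (List String)) : List (Int × Int) :=
  (PySem.List.pyRange 0 state.length 1).foldl (fun acc row =>
    (PySem.List.pyRange 0 (state.headD []).length 1).foldl (fun acc2 col =>
      if PySem.List.pyGetD (PySem.List.pyGetD state row []) col "" == letter
      then acc2 ++ [(row, col)] else acc2) acc) []

def num_cars_above (letter : String) (state : List (List String)) : Int :=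
  let coords := coords_car letter state
  -- the for-loop over coords appends rows and returns 0 at the first coord with row 0
  if coords.any (fun p => p.1 == 0) then 0
  else
    match PySem.List.min? (coords.map (fun p => p.1)) (fun x => x) with
    | none => 0  -- Python: ValueError from min([]); excluded by Pre_
    | some m =>
      if PySem.List.pyGetD (PySem.List.pyGetD state (m - 1) [])
          (PySem.List.pyGetD coords 0 (0, 0)).2 "" != "-" then 1 else 0

-- ===== PORT B =====
-- inner 'for c, cell in enumerate(row)' of Source B: decide at the first cell equal to letter
def bRowLoop (letter : String) (state : List (List String)) (r : Nat) :
    List String → Nat → Option Int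
  | [], _ => none
  | cell :: rest, c =>
    if cell == letter then
      some (if r == 0 then (0 : Int)
            else if PySem.List.pyGetD (PySem.List.pyGetD state ((r : Int) - 1) []) ((c : Int)) "" != "-"
                 then 1 else 0)
    else bRowLoop letter state r rest (c + 1)

-- outer 'for r, row in enumerate(state)' of Source B
def bGridLoop (letter : String) (state : List (List String)) :
    List (List String) → Nat → Option Int
  | [], _ => none
  | row :: rest, r =>
    match bRowLoop letter state r row 0 with
    | some v => some v
    | none => bGridLoop letter state rest (r + 1)

def num_cars_above_alt (letter : String) (state : List (List String)) : Int :=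
  (bGridLoop letter state state 0).getD 0  -- none = Python raises ValueError; excluded by Pre_

-- ===== PRECONDITION & SPEC =====
-- Pre_ excludes inputs where A raises (empty grid or letter absent from the scanned rectangle: ValueError
-- from min([]); rows shorter than row 0: IndexError) and the ragged grids on which A's truncation of every
-- row to row 0's width is an implementation artefact that B's whole-row scan does not reproduce.
def Pre_num_cars_above (letter : String) (state : List (List String)) : Prop :=
  state ≠ [] ∧ (∀ row ∈ state, row.length = (state.headD []).length) ∧ (∃ row ∈ state, letter ∈ row)
instance (letter : String) (state : List (List String)) : Decidable (Pre_num_cars_above letter state) := by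
  unfold Pre_num_cars_above; infer_instance
def pvWitness_num_cars_above : String × List (List String) := ("X", [["-", "-"], ["X", "-"]])

def Spec_num_cars_above (letter : String) (state : List (List String)) (out : Int) : Prop := out = num_cars_above_alt letter state
instance (letter : String) (state : List (List String)) (out : Int) : Decidable (Spec_num_cars_above letter state out) := by unfold Spec_num_cars_above; infer_instance

-- ===== CLAIM (what is proved, stated in full; the proofs are below) =====
def Claim_equal_num_cars_above : Prop := ∀ (letter : String) (state : List (List String)), Dom_num_cars_above letter state → Pre_num_cars_above letter state → Spec_num_cars_above letter state (num_cars_above letter state)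

-- ===== LEMMAS AND PROOFS =====

-- the rows (indices) whose row contains the letter, in increasing order
def hitRows (letter : String) (state : List (List String)) : List Nat :=
  (List.range state.length).filter (fun r => (state.getD r []).contains letter)

-- the columns of row r (within row 0's width) holding the letter, in increasing order
def colHits (letter : String) (state : List (List String)) (r : Nat) : List Nat :=
  (List.range (state.headD []).length).filter (fun c => (state.getD r []).getD c "" == letter)

theorem coords_car_eq (letter : String) (state : List (List String)) :
    coords_car letter state =
      (List.range state.length).flatMap
        (fun r => (colHits letter state r).map (fun c : Nat => ((r : Int), (c : Int)))) := by
  unfold coords_car colHits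
  simp only [PySem.List.foldl_append_if, PySem.List.foldl_append_eq_flatMap,
    PySem.List.pyRange_zero_natCast, List.flatMap_map, List.filter_map, List.map_map,
    Function.comp_def, PySem.List.pyGetD_natCast, List.nil_append]

theorem foldl_min_of_le (t : List Int) (x : Int) (h : ∀ y ∈ t, x ≤ y) : t.foldl min x = x := by
  rcases PySem.List.foldl_min_mem t x with h1 | h1
  · exact h1
  · exact le_antisymm (PySem.List.foldl_min_le t x).1 (h _ h1)

theorem mem_hitRows (letter : String) (state : List (List String)) (r : Nat) :
    r ∈ hitRows letter state ↔ r < state.length ∧ letter ∈ state.getD r [] := by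
  unfold hitRows
  simp [List.mem_filter, List.mem_range]

theorem pairwise_hitRows (letter : String) (state : List (List String)) :
    (hitRows letter state).Pairwise (· < ·) :=
  List.Pairwise.filter _ List.pairwise_lt_range

theorem pairwise_colHits (letter : String) (state : List (List String)) (r : Nat) :
    (colHits letter state r).Pairwise (· < ·) :=
  List.Pairwise.filter _ List.pairwise_lt_range

theorem getD_length (state : List (List String))
    (hrect : ∀ row ∈ state, row.length = (state.headD []).length) {r : Nat}
    (hr : r < state.length) : (state.getD r []).length = (state.headD []).length := by
  rw [List.getD_eq_getElem _ _ hr]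
  exact hrect _ (List.getElem_mem _)

theorem mem_colHits (letter : String) (state : List (List String)) (r c : Nat) :
    c ∈ colHits letter state r ↔
      c < (state.headD []).length ∧ (state.getD r []).getD c "" = letter := by
  unfold colHits
  simp [List.mem_filter, List.mem_range]

theorem colHits_ne_nil (letter : String) (state : List (List String))
    (hrect : ∀ row ∈ state, row.length = (state.headD []).length) {r : Nat}
    (hr : r < state.length) (hl : letter ∈ state.getD r []) :
    colHits letter state r ≠ [] := by
  obtain ⟨i, hi, hEq⟩ := List.mem_iff_getElem.mp hl
  have hlen := getD_length state hrect hr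
  intro hnil
  have hmem : i ∈ colHits letter state r :=
    (mem_colHits letter state r i).mpr ⟨by omega, by rw [List.getD_eq_getElem _ _ hi]; exact hEq⟩
  simp [hnil] at hmem

theorem colHits_eq_nil (letter : String) (state : List (List String))
    (hrect : ∀ row ∈ state, row.length = (state.headD []).length) {r : Nat}
    (hr : r < state.length) (hnl : letter ∉ state.getD r []) :
    colHits letter state r = [] := by
  unfold colHits
  rw [List.filter_eq_nil_iff]
  intro c hc
  simp only [List.mem_range] at hc
  simp only [beq_iff_eq]
  intro heq
  have hclen : c < (state.getD r []).length := by rw [getD_length state hrect hr]; exact hc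
  have hmem : (state.getD r []).getD c "" ∈ state.getD r [] := by
    rw [List.getD_eq_getElem _ _ hclen]; exact List.getElem_mem _
  exact hnl (heq ▸ hmem)

theorem flatMap_eq_flatMap_filter {α β : Type} (l : List α) (p : α → Bool) (g : α → List β)
    (h : ∀ x ∈ l, p x = false → g x = []) : l.flatMap g = (l.filter p).flatMap g := by
  induction l with
  | nil => rfl
  | cons x t ih =>
    have ih' := ih (fun y hy => h y (List.mem_cons_of_mem _ hy))
    simp only [List.flatMap_cons, List.filter_cons]
    cases hx : p x with
    | true => simp [List.flatMap_cons, ih']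
    | false => simp [h x (List.mem_cons_self ..) hx, ih']

-- B's inner loop = first index of letter in the row
theorem bRowLoop_eq (letter : String) (state : List (List String)) (r : Nat)
    (row : List String) : ∀ (c : Nat), bRowLoop letter state r row c =
      (PySem.List.index? row letter).map (fun k =>
        if r == 0 then (0 : Int)
        else if PySem.List.pyGetD (PySem.List.pyGetD state ((r : Int) - 1) [])
                 (((c + k : Nat) : Int)) "" != "-" then 1 else 0) := by
  induction row with
  | nil => intro c; simp [bRowLoop, PySem.List.index?_eq_idxOf?]
  | cons cell rest ih =>
    intro c
    by_cases hcell : cell = letter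
    · subst hcell
      rw [PySem.List.index?_cons_self, Option.map_some]
      simp [bRowLoop]
    · have hne : (cell == letter) = false := beq_eq_false_iff_ne.mpr hcell
      rw [PySem.List.index?_cons_of_ne (x := cell) (v := letter) rest hcell]
      simp only [bRowLoop, hne, Bool.false_eq_true, if_false, ih (c + 1), Option.map_map]
      congr 1
      funext k
      have : c + 1 + k = c + (k + 1) := by omega
      rw [Function.comp_apply, this]

-- B's outer loop skips rows not containing the letter
theorem bGridLoop_skip (letter : String) (state : List (List String))
    (pre : List (List String)) (hp : ∀ q ∈ pre, letter ∉ q) :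
    ∀ (l : List (List String)) (r : Nat),
      bGridLoop letter state (pre ++ l) r = bGridLoop letter state l (r + pre.length) := by
  induction pre with
  | nil => intro l r; simp
  | cons q pre' ih =>
    intro l r
    have hq : letter ∉ q := hp q (List.mem_cons_self ..)
    have hnone : PySem.List.index? q letter = none := (PySem.List.index?_eq_none_iff _ _).mpr hq
    simp only [List.cons_append, bGridLoop, bRowLoop_eq, hnone, Option.map_none]
    rw [ih (fun y hy => hp y (List.mem_cons_of_mem _ hy)) l (r + 1)]
    congr 1
    simp [List.length_cons]
    omega

-- ===== VERDICT (by name: the statement is the Claim_ definition above) =====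
theorem num_cars_above_spec : Claim_equal_num_cars_above := by
  intro letter state _hdom hpre
  obtain ⟨hne, hrect, row0, hr0, hl0⟩ := hpre
  unfold Spec_num_cars_above
  -- hitRows is nonempty
  obtain ⟨r0, hr0lt, hr0mem⟩ : ∃ r, r < state.length ∧ letter ∈ state.getD r [] := by
    obtain ⟨i, hi, hEq⟩ := List.mem_iff_getElem.mp hr0
    exact ⟨i, hi, by rw [List.getD_eq_getElem _ _ hi, hEq]; exact hl0⟩
  have hr0hit : r0 ∈ hitRows letter state := (mem_hitRows letter state r0).mpr ⟨hr0lt, hr0mem⟩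
  obtain ⟨h, rest, hhit⟩ : ∃ h rest, hitRows letter state = h :: rest := by
    cases hh : hitRows letter state with
    | nil => rw [hh] at hr0hit; cases hr0hit
    | cons a t => exact ⟨a, t, rfl⟩
  have hpair := pairwise_hitRows letter state
  rw [hhit] at hpair
  have hrestlt : ∀ y ∈ rest, h < y := (List.pairwise_cons.mp hpair).1
  have hmin : ∀ r ∈ hitRows letter state, h ≤ r := by
    rw [hhit]; intro r hr
    rcases List.mem_cons.mp hr with rfl | hr
    · exact le_refl _
    · exact le_of_lt (hrestlt r hr)
  have hhmem : h ∈ hitRows letter state := by rw [hhit]; exact List.mem_cons_self ..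
  have hhlt : h < state.length := ((mem_hitRows letter state h).mp hhmem).1
  have hhletter : letter ∈ state.getD h [] := ((mem_hitRows letter state h).mp hhmem).2
  -- coords structure
  have hcoords : coords_car letter state =
      (hitRows letter state).flatMap
        (fun r => (colHits letter state r).map (fun c : Nat => ((r : Int), (c : Int)))) := by
    rw [coords_car_eq]
    exact flatMap_eq_flatMap_filter _ _ _ (fun r hr hpr => by
      have hnl : letter ∉ state.getD r [] := by
        intro hm
        rw [← List.contains_iff_mem] at hm
        rw [hm] at hpr
        cases hpr
      rw [colHits_eq_nil letter state hrect (List.mem_range.mp hr) hnl, List.map_nil])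
  have hch : colHits letter state h ≠ [] := colHits_ne_nil letter state hrect hhlt hhletter
  obtain ⟨c0, ctail, hchc⟩ : ∃ c0 ctail, colHits letter state h = c0 :: ctail := by
    cases hh : colHits letter state h with
    | nil => exact absurd hh hch
    | cons a t => exact ⟨a, t, rfl⟩
  have hcoords' : coords_car letter state =
      ((h : Int), (c0 : Int)) ::
        (ctail.map (fun c : Nat => ((h : Int), (c : Int))) ++
          rest.flatMap (fun r => (colHits letter state r).map (fun c : Nat => ((r : Int), (c : Int))))) := by
    rw [hcoords, hhit]
    simp [List.flatMap_cons, hchc]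
  have hc0mem : c0 ∈ colHits letter state h := by rw [hchc]; exact List.mem_cons_self ..
  have hc0min : ∀ c ∈ colHits letter state h, c0 ≤ c := by
    have hp := pairwise_colHits letter state h
    rw [hchc] at hp
    rw [hchc]; intro c hc
    rcases List.mem_cons.mp hc with rfl | hc
    · exact le_refl _
    · exact le_of_lt ((List.pairwise_cons.mp hp).1 c hc)
  -- B's first index in row h equals c0
  obtain ⟨k, hk⟩ : ∃ k, PySem.List.index? (state.getD h []) letter = some k :=
    Option.isSome_iff_exists.mp ((PySem.List.index?_isSome_iff _ _).mpr hhletter)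
  have hkc0 : k = c0 := by
    obtain ⟨hklt, hkeq, hkmin⟩ := PySem.List.getElem_of_index?_eq_some hk
    have hlenh : (state.getD h []).length = (state.headD []).length := getD_length state hrect hhlt
    obtain ⟨hc0lt, hc0eq⟩ := (mem_colHits letter state h c0).mp hc0mem
    have hkmem : k ∈ colHits letter state h :=
      (mem_colHits letter state h k).mpr ⟨by omega, by rw [List.getD_eq_getElem _ _ hklt]; exact hkeq⟩
    have h1 : c0 ≤ k := hc0min k hkmem
    have hc0lt' : c0 < (state.getD h []).length := by omega
    have hc0getElem : (state.getD h [])[c0] = letter := by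
      rw [← List.getD_eq_getElem _ _ hc0lt']; exact hc0eq
    have h2 : k ≤ c0 := by
      rcases Nat.lt_or_ge c0 k with h' | h'
      · exact absurd hc0getElem (hkmin c0 h')
      · exact h'
    omega
  -- B's grid loop: skip the first h rows (none contains letter), then decide in row h
  have htake : ∀ q ∈ state.take h, letter ∉ q := by
    intro q hq hql
    obtain ⟨i, hi, hEq⟩ := List.mem_iff_getElem.mp hq
    have hi' : i < h := by
      have := hi
      simp [List.length_take] at this
      omega
    have hilen : i < state.length := by omega
    have : (state.take h)[i] = state[i] := List.getElem_take
    have hihit : i ∈ hitRows letter state := by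
      rw [mem_hitRows]
      refine ⟨hilen, ?_⟩
      rw [List.getD_eq_getElem _ _ hilen, ← this, hEq]
      exact hql
    have := hmin i hihit
    omega
  have hsplit : state = state.take h ++ state[h] :: state.drop (h + 1) := by
    conv_lhs => rw [← List.take_append_drop h state]
    congr 1
    rw [List.drop_eq_getElem_cons hhlt]
  have hlen_take : (state.take h).length = h := by
    rw [List.length_take]; omega
  have hB : num_cars_above_alt letter state =
      (if h == 0 then (0 : Int)
       else if PySem.List.pyGetD (PySem.List.pyGetD state ((h : Int) - 1) []) ((k : Int)) "" != "-"
            then 1 else 0) := by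
    have hgetD : state.getD h [] = state[h] := List.getD_eq_getElem _ _ hhlt
    have key : ∀ st' : List (List String), bGridLoop letter st' state 0 =
        some (if h == 0 then (0 : Int)
              else if PySem.List.pyGetD (PySem.List.pyGetD st' ((h : Int) - 1) []) ((k : Int)) "" != "-"
                   then 1 else 0) := by
      intro st'
      conv_lhs => rw [hsplit]
      rw [bGridLoop_skip letter st' _ htake, hlen_take]
      simp only [bGridLoop, bRowLoop_eq, ← hgetD, hk, Option.map_some, Nat.zero_add]
    unfold num_cars_above_alt
    rw [key state, Option.getD_some]
  by_cases h0 : h = 0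
  · -- car in top row: both return 0
    subst h0
    have hA : num_cars_above letter state = 0 := by
      simp only [num_cars_above]
      rw [hcoords']
      simp
    rw [hA, hB]
    simp
  · -- car not in top row
    have hanyf : (coords_car letter state).any (fun p => p.1 == 0) = false := by
      rw [List.any_eq_false]
      intro p hp
      rw [hcoords] at hp
      obtain ⟨r, hrhit, hpm⟩ := List.mem_flatMap.mp hp
      obtain ⟨c, _, rfl⟩ := List.mem_map.mp hpm
      simp only [beq_iff_eq]
      intro hr0'
      have : r = 0 := by exact_mod_cast hr0'
      subst this
      exact h0 (Nat.le_zero.mp (hmin 0 hrhit))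
    have hAmin : PySem.List.min? ((coords_car letter state).map (fun p : Int × Int => p.1)) (fun x => x)
        = some (h : Int) := by
      have hfst : ∀ y ∈ (coords_car letter state).map (fun p : Int × Int => p.1), (h : Int) ≤ y := by
        intro y hy
        obtain ⟨p, hp, rfl⟩ := List.mem_map.mp hy
        rw [hcoords] at hp
        obtain ⟨r, hrhit, hpm⟩ := List.mem_flatMap.mp hp
        obtain ⟨c, _, rfl⟩ := List.mem_map.mp hpm
        show (h : Int) ≤ (r : Int)
        exact_mod_cast hmin r hrhit
      rw [hcoords', List.map_cons] at hfst ⊢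
      rw [PySem.List.min?_id_cons, foldl_min_of_le _ _ (fun y hy => hfst y (List.mem_cons_of_mem _ hy))]
    have hhead : PySem.List.pyGetD (coords_car letter state) 0 ((0 : Int), (0 : Int))
        = ((h : Int), (c0 : Int)) := by
      rw [hcoords']
      simp [PySem.List.pyGetD]
    have hne0 : (h == 0) = false := by
      simp only [beq_eq_false_iff_ne, ne_eq]
      exact h0
    have hA : num_cars_above letter state =
        (if PySem.List.pyGetD (PySem.List.pyGetD state ((h : Int) - 1) []) (c0 : Int) "" != "-"
         then 1 else 0) := by
      simp only [num_cars_above]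
      rw [hanyf, hAmin, hhead]
      simp
    rw [hA, hB, hne0, hkc0]
    simp
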